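-- pv_equiv track=rewrite | github.com/sga-jerrylin/SGA-Office | app/services/doc_builder.py | _convert_tab_tables_to_markdown
-- ===== SOURCE A (Python) =====
-- def _convert_tab_tables_to_markdown(content: str) -> str:
--     """将 Tab 分隔的表格转换为 Markdown 表格"""
--     lines = content.split('\n')
--     result = []
--     i = 0
--     while i < len(lines):
--         line = lines[i]
--         if '\t' in line and line.count('\t') >= 1:
--             table_lines = []
--             while i < len(lines) and '\t' in lines[i]:
--                 table_lines.append(lines[i])
--                 i += 1
--             if len(table_lines) >= 2:
--                 for j, tline in enumerate(table_lines):
--                     cells = tline.split('\t')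
--                     md_row = '| ' + ' | '.join(cells) + ' |'
--                     result.append(md_row)
--                     if j == 0:
--                         separator = '| ' + ' | '.join(['---'] * len(cells)) + ' |'
--                         result.append(separator)
--             else:
--                 result.extend(table_lines)
--         else:
--             result.append(line)
--             i += 1
--     return '\n'.join(result)
-- ===== SOURCE B (Python) =====
-- def _convert_tab_tables_to_markdown(content: str) -> str:
--     # Build maximal runs of consecutive lines sharing the same "contains a tab" key,
--     # then render each run: tab-runs of length >= 2 become Markdown tables.
--     groups = []
--     for line in content.split('\n'):
--         key = '\t' in line
--         if groups and groups[-1][0] == key: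
--             groups[-1][1].append(line)
--         else:
--             groups.append((key, [line]))
--     out = []
--     for has_tab, run in groups:
--         if has_tab and len(run) >= 2:
--             head, *rest = run
--             cells = head.split('\t')
--             out.append('| ' + ' | '.join(cells) + ' |')
--             out.append('| ' + ' | '.join(['---'] * len(cells)) + ' |')
--             for t in rest:
--                 out.append('| ' + ' | '.join(t.split('\t')) + ' |')
--         else:
--             out.extend(run)
--     return '\n'.join(out)
-- ===== Notes on version B (the rewrite author's own statement) =====
-- stated objective: alternative
-- what changed: Replaces A's index-driven outer/inner while-loop that scans ahead for table runs with a two-pass decomposition: one pass partitions the lines into maximal consecutive runs keyed by whether a line has a tab, a second pass renders each run (tab-keyed runs of length at least 2 become Markdown tables, everything else is emitted verbatim).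
import Mathlib
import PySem

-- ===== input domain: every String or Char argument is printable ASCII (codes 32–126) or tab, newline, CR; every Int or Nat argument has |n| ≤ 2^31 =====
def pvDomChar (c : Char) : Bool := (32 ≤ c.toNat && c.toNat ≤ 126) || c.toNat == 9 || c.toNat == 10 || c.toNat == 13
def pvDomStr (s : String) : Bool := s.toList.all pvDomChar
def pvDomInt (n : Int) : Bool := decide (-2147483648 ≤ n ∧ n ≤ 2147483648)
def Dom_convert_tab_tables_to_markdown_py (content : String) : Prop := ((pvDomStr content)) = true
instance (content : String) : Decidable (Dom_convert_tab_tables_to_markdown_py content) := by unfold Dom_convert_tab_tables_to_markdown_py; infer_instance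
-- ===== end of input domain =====

-- B replaces A's index-driven nested-while grouping by a build-groups-then-render-groups
-- decomposition (same asymptotic cost; objective: alternative structure).

-- exact port of Python's s.split(sep) for a nonempty separator (used by both Pythons)
def pvPySplit (s sep : String) : List String :=
  (PySem.Chars.splitOn s.toList sep.toList).map String.ofList

-- ===== PORT A =====
def pvHasTabA (l : String) : Bool := PySem.Str.isIn "\t" l

-- body of "for j, tline in enumerate(table_lines): …" (appends to result)
def pvStepA (res : List String) (jt : Int × String) : List String :=
  let cells := pvPySplit jt.2 "\t"
  let res' := res ++ ["| " ++ PySem.Str.join " | " cells ++ " |"]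
  if jt.1 == 0 then
    res' ++ ["| " ++ PySem.Str.join " | " (List.replicate cells.length "---") ++ " |"]
  else res'
def pvEmitTableA (acc : List String) (tl : List String) : List String :=
  (PySem.List.enumerate tl 0).foldl pvStepA acc

-- the outer while over lines, index i becomes the remaining suffix; the inner
-- while collecting table_lines is the takeWhile/dropWhile of the tab-predicate
def pvLoopA (acc : List String) : List String → List String
  | [] => acc
  | line :: rest =>
    if pvHasTabA line && decide (1 ≤ PySem.Str.count line "\t") then
      let tableLines := line :: rest.takeWhile pvHasTabA
      if 2 ≤ tableLines.length then
        pvLoopA (pvEmitTableA acc tableLines) (rest.dropWhile pvHasTabA)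
      else
        pvLoopA (acc ++ tableLines) (rest.dropWhile pvHasTabA)
    else pvLoopA (acc ++ [line]) rest
  termination_by ls => ls.length
  decreasing_by
  · exact Nat.lt_succ_of_le (List.length_dropWhile_le _ _)
  · exact Nat.lt_succ_of_le (List.length_dropWhile_le _ _)
  · simp

def convert_tab_tables_to_markdown_py (content : String) : String :=
  PySem.Str.join "\n" (pvLoopA [] (pvPySplit content "\n"))

-- ===== PORT B =====
def pvKeyB (l : String) : Bool := PySem.Str.isIn "\t" l

-- one step of the grouping pass: append to the last run if its key matches, else open a new run
def pvAddLineB (groups : List (Bool × List String)) (line : String) : List (Bool × List String) :=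
  let key := pvKeyB line
  match groups.getLast? with
  | some (k, run) =>
    if k == key then groups.dropLast ++ [(k, run ++ [line])]
    else groups ++ [(key, [line])]
  | none => [(key, [line])]

def pvRowB (t : String) : String :=
  "| " ++ PySem.Str.join " | " (pvPySplit t "\t") ++ " |"

-- render one (key, run) group
def pvRenderGroupB : Bool × List String → List String
  | (hasTab, run) =>
    if hasTab && decide (2 ≤ run.length) then
      match run with
      | [] => []
      | head :: rest =>
        pvRowB head
          :: ("| " ++ PySem.Str.join " | "
                (List.replicate (pvPySplit head "\t").length "---") ++ " |")
          :: rest.map pvRowB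
    else run

def convert_tab_tables_to_markdown_py_alt (content : String) : String :=
  PySem.Str.join "\n"
    (((pvPySplit content "\n").foldl pvAddLineB []).foldl
      (fun out g => out ++ pvRenderGroupB g) [])

-- ===== PRECONDITION & SPEC =====
def Spec_convert_tab_tables_to_markdown_py (content : String) (out : String) : Prop := out = convert_tab_tables_to_markdown_py_alt content
instance (content : String) (out : String) : Decidable (Spec_convert_tab_tables_to_markdown_py content out) := by unfold Spec_convert_tab_tables_to_markdown_py; infer_instance

-- ===== CLAIM (what is proved, stated in full; the proofs are below) =====
def Claim_equal_convert_tab_tables_to_markdown_py : Prop := ∀ (content : String), Dom_convert_tab_tables_to_markdown_py content → Spec_convert_tab_tables_to_markdown_py content (convert_tab_tables_to_markdown_py content)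

-- ===== LEMMAS AND PROOFS =====

-- the span-grouping both sides compute: maximal runs of lines with equal tab-key
def pvSG : List String → List (Bool × List String)
  | [] => []
  | x :: xs =>
    (pvKeyB x, x :: xs.takeWhile (fun l => pvKeyB l == pvKeyB x)) ::
      pvSG (xs.dropWhile (fun l => pvKeyB l == pvKeyB x))
  termination_by ls => ls.length
  decreasing_by exact Nat.lt_succ_of_le (List.length_dropWhile_le _ _)

theorem go_mono (sub : List Char) : ∀ fuel (l : List Char) acc, acc ≤ PySem.Chars.count.go sub fuel l acc := by
  intro fuel
  induction fuel with
  | zero => intro l acc; cases l <;> simp [PySem.Chars.count.go]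
  | succ f IH =>
    intro l acc
    cases l with
    | nil => simp [PySem.Chars.count.go]
    | cons h t =>
      simp only [PySem.Chars.count.go]
      split
      · exact le_trans (Nat.le_succ acc) (IH _ _)
      · exact IH _ _

theorem pvCount_go_ge (sub : List Char) (hs : sub ≠ []) :
    ∀ fuel (l : List Char) acc, l.length ≤ fuel → sub <:+: l →
      acc + 1 ≤ PySem.Chars.count.go sub fuel l acc := by
  intro fuel
  induction fuel with
  | zero =>
    intro l acc hl hi
    have : l = [] := List.eq_nil_of_length_eq_zero (Nat.le_zero.mp hl)
    subst this
    exact absurd (List.eq_nil_of_infix_nil hi) hs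
  | succ f IH =>
    intro l acc hl hi
    cases l with
    | nil => exact absurd (List.eq_nil_of_infix_nil hi) hs
    | cons h t =>
      simp only [PySem.Chars.count.go]
      split
      · exact go_mono _ _ _ _
      · rename_i hp
        rcases List.infix_cons_iff.mp hi with hpre | hinf
        · exact absurd (List.isPrefixOf_iff_prefix.mpr hpre) (by simpa using hp)
        · exact IH t acc (by simpa using Nat.le_of_succ_le_succ (by simpa using hl)) hinf

theorem pvGuardA (l : String) :
    (pvHasTabA l && decide (1 ≤ PySem.Str.count l "\t")) = pvKeyB l := by
  cases hk : pvKeyB l with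
  | false =>
    have hk2 : PySem.Chars.isIn ['\t'] l.toList = false := by simpa [pvKeyB] using hk
    simp [pvHasTabA, hk2]
  | true =>
    have hk' : PySem.Str.isIn "\t" l = true := hk
    have hinf : ("\t" : String).toList <:+: l.toList := (PySem.Str.isIn_iff_infix _ _).mp hk'
    have h1 : 1 ≤ PySem.Str.count l "\t" := by
      have := pvCount_go_ge ("\t".toList) (by decide) l.toList.length l.toList 0 (le_refl _) hinf
      simpa [PySem.Str.count, PySem.Chars.count] using this
    have hk2 : PySem.Chars.isIn ['\t'] l.toList = true := by simpa [pvKeyB] using hk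
    have h1' : 1 ≤ PySem.Chars.count l.toList ['\t'] := by simpa using h1
    simp [pvHasTabA, hk2, h1']

theorem pvAdd_concat (gs : List (Bool × List String)) (k : Bool) (run : List String) (x : String) :
    pvAddLineB (gs ++ [(k, run)]) x =
      if k == pvKeyB x then gs ++ [(k, run ++ [x])]
      else gs ++ [(k, run), (pvKeyB x, [x])] := by
  simp only [pvAddLineB, List.getLast?_concat, List.dropLast_concat]
  split <;> simp

theorem pvFoldlAdd_prefix (xs : List String) :
    ∀ gs g, List.foldl pvAddLineB (gs ++ [g]) xs = gs ++ List.foldl pvAddLineB [g] xs := by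
  induction xs with
  | nil => intro gs g; simp
  | cons x xs IH =>
    intro gs g
    obtain ⟨k, run⟩ := g
    have hstep := pvAdd_concat ([] : List (Bool × List String)) k run x
    simp only [List.nil_append] at hstep
    simp only [List.foldl_cons, pvAdd_concat, hstep]
    by_cases hk : (k == pvKeyB x) = true
    · rw [if_pos hk, if_pos hk]
      exact IH gs (k, run ++ [x])
    · rw [if_neg hk, if_neg hk]
      have h2 : gs ++ [(k, run), (pvKeyB x, [x])] = (gs ++ [(k, run)]) ++ [(pvKeyB x, [x])] := by simp
      have h3 : [(k, run), (pvKeyB x, [x])] = [(k, run)] ++ [(pvKeyB x, [x])] := rfl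
      rw [h2, IH (gs ++ [(k, run)]) (pvKeyB x, [x]), h3, IH [(k, run)] (pvKeyB x, [x])]
      simp

theorem pvFoldlAdd_single (xs : List String) :
    ∀ k run, List.foldl pvAddLineB [(k, run)] xs =
      (k, run ++ xs.takeWhile (fun l => pvKeyB l == k)) ::
        pvSG (xs.dropWhile (fun l => pvKeyB l == k)) := by
  induction xs with
  | nil => intro k run; simp [pvSG]
  | cons x xs IH =>
    intro k run
    have hstep := pvAdd_concat ([] : List (Bool × List String)) k run x
    simp only [List.nil_append] at hstep
    simp only [List.foldl_cons, hstep]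
    by_cases hk : (k == pvKeyB x) = true
    · rw [if_pos hk]
      have hke : pvKeyB x = k := (beq_iff_eq.mp hk).symm
      rw [List.takeWhile_cons_of_pos (by simp [hke]), List.dropWhile_cons_of_pos (by simp [hke])]
      rw [IH k (run ++ [x])]
      simp
    · rw [if_neg hk]
      have hke : pvKeyB x ≠ k := fun h => hk (beq_iff_eq.mpr h.symm)
      have h3 : [(k, run), (pvKeyB x, [x])] = [(k, run)] ++ [(pvKeyB x, [x])] := rfl
      rw [h3, pvFoldlAdd_prefix xs [(k, run)] (pvKeyB x, [x]), IH (pvKeyB x) [x]]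
      rw [List.takeWhile_cons_of_neg (by simp [hke]), List.dropWhile_cons_of_neg (by simp [hke])]
      rw [pvSG]
      simp

theorem pvGroups_eq_sg (xs : List String) : List.foldl pvAddLineB [] xs = pvSG xs := by
  cases xs with
  | nil => simp [pvSG]
  | cons x xs =>
    have h0 : pvAddLineB [] x = [(pvKeyB x, [x])] := by simp [pvAddLineB]
    simp only [List.foldl_cons, h0, pvFoldlAdd_single, pvSG]
    simp

theorem pvFlat_false (xs : List String) :
    xs.takeWhile (fun l => pvKeyB l == false) ++
      (pvSG (xs.dropWhile (fun l => pvKeyB l == false))).flatMap pvRenderGroupB =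
    (pvSG xs).flatMap pvRenderGroupB := by
  cases xs with
  | nil => simp
  | cons y ys =>
    cases hk : pvKeyB y with
    | true =>
      rw [List.takeWhile_cons_of_neg (by simp [hk]), List.dropWhile_cons_of_neg (by simp [hk])]
      simp
    | false =>
      rw [List.takeWhile_cons_of_pos (by simp [hk]), List.dropWhile_cons_of_pos (by simp [hk])]
      rw [pvSG, hk]
      simp only [List.flatMap_cons]
      rw [show pvRenderGroupB (false, y :: List.takeWhile (fun l => pvKeyB l == false) ys)
            = y :: List.takeWhile (fun l => pvKeyB l == false) ys from by simp [pvRenderGroupB]]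

theorem pvStepA_zero (res : List String) (t : String) :
    pvStepA res (0, t) = res ++ [pvRowB t]
      ++ ["| " ++ PySem.Str.join " | " (List.replicate (pvPySplit t "\t").length "---") ++ " |"] := by
  simp [pvStepA, pvRowB]

theorem pvStepA_pos (res : List String) (s : Int) (t : String) (hs : s ≠ 0) :
    pvStepA res (s, t) = res ++ [pvRowB t] := by
  simp [pvStepA, pvRowB, hs]

theorem pvEmitTail (rest : List String) :
    ∀ (s : Int) acc, 1 ≤ s →
      (PySem.List.enumerate rest s).foldl pvStepA acc = acc ++ rest.map pvRowB := by
  induction rest with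
  | nil => intro s acc _; simp [PySem.List.enumerate]
  | cons r rs IH =>
    intro s acc hs
    rw [PySem.List.enumerate_cons, List.foldl_cons, pvStepA_pos _ _ _ (by omega),
      IH (s + 1) _ (by omega)]
    simp

theorem pvEmit_eq_render (acc : List String) (tl : List String) (h2 : 2 ≤ tl.length) :
    pvEmitTableA acc tl = acc ++ pvRenderGroupB (true, tl) := by
  match tl with
  | [] => simp at h2
  | head :: rest =>
    rw [show pvRenderGroupB (true, head :: rest)
          = pvRowB head
              :: ("| " ++ PySem.Str.join " | "
                    (List.replicate (pvPySplit head "\t").length "---") ++ " |")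
              :: rest.map pvRowB from by
        simp only [pvRenderGroupB]; rw [if_pos (by simpa using h2)]]
    unfold pvEmitTableA
    rw [PySem.List.enumerate_cons, List.foldl_cons, pvStepA_zero,
      pvEmitTail rest (0 + 1) _ (by omega)]
    simp

theorem pvLoopA_eq (n : Nat) : ∀ (ls : List String), ls.length = n → ∀ acc,
    pvLoopA acc ls = acc ++ (pvSG ls).flatMap pvRenderGroupB := by
  induction n using Nat.strong_induction_on with
  | _ n IH =>
    intro ls hlen acc
    cases ls with
    | nil => simp [pvLoopA, pvSG]
    | cons x xs =>
      subst hlen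
      rw [pvLoopA, pvGuardA x]
      cases hk : pvKeyB x with
      | false =>
        rw [if_neg (by simp)]
        rw [IH xs.length (by simp) xs rfl]
        rw [pvSG, hk]
        simp only [List.flatMap_cons]
        rw [show pvRenderGroupB (false, x :: List.takeWhile (fun l => pvKeyB l == false) xs)
              = x :: List.takeWhile (fun l => pvKeyB l == false) xs from by simp [pvRenderGroupB]]
        rw [← pvFlat_false xs]
        simp
      | true =>
        rw [if_pos rfl]
        have hpr : pvHasTabA = (fun l => pvKeyB l == true) := by
          funext l; simp [pvHasTabA, pvKeyB]
        have hlt : (xs.dropWhile (fun l => pvKeyB l == true)).length < (x :: xs).length :=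
          Nat.lt_succ_of_le (List.length_dropWhile_le _ _)
        rw [hpr, pvSG, hk]
        simp only [List.flatMap_cons]
        by_cases h2 : 2 ≤ (x :: xs.takeWhile (fun l => pvKeyB l == true)).length
        · rw [if_pos h2]
          rw [IH _ hlt _ rfl, pvEmit_eq_render _ _ h2]
          simp
        · rw [if_neg h2]
          rw [IH _ hlt _ rfl]
          rw [show pvRenderGroupB (true, x :: List.takeWhile (fun l => pvKeyB l == true) xs)
                = x :: List.takeWhile (fun l => pvKeyB l == true) xs from by
              simp only [pvRenderGroupB]; rw [if_neg (by simpa using h2)]]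
          simp

-- ===== VERDICT (by name: the statement is the Claim_ definition above) =====
theorem convert_tab_tables_to_markdown_py_spec : Claim_equal_convert_tab_tables_to_markdown_py := by
  intro content _
  show _ = _
  unfold convert_tab_tables_to_markdown_py convert_tab_tables_to_markdown_py_alt
  rw [pvGroups_eq_sg, PySem.List.foldl_append_eq_flatMap,
    pvLoopA_eq (pvPySplit content "\n").length _ rfl]
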